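-- pv_equiv track=rewrite | github.com/FaxWeb7/competetive_programming | preparation/yandex_course/6_prefixes&2pointers/main.py | best_team_sum
-- ===== SOURCE A (Python) =====
-- def best_team_sum(skills):
--     ans = 0
--     nowsum = 0
--     right = 0
--     for left in range(len(skills)):
--         while right < len(skills) and (left == right or skills[left] + skills[left+1] >= skills[right]):
--             nowsum += skills[right]
--             right += 1
--         ans = max(ans, nowsum)
--         nowsum -= skills[left]
--     return ans
-- ===== SOURCE B (Python) =====
-- def best_team_sum(skills):
--     n = len(skills)
--     # pass 1: exclusive right boundary of each left's window (boundaries are monotone)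
--     bounds = []
--     r = 0
--     for left in range(n):
--         if r <= left:
--             r = left + 1
--         if left + 1 < n:
--             t = skills[left] + skills[left + 1]
--             while r < n and skills[r] <= t:
--                 r += 1
--         bounds.append(r)
--     # pass 2: prefix sums
--     prefix = [0]
--     for x in skills:
--         prefix.append(prefix[-1] + x)
--     # pass 3: best window sum (empty window allowed -> 0)
--     best = 0
--     i = 0
--     for b in bounds:
--         best = max(best, prefix[b] - prefix[i])
--         i += 1
--     return best
-- ===== Notes on version B (the rewrite author's own statement) =====
-- stated objective: alternative
-- what changed: Replaces the fused two-pointer loop (running window sum and running max maintained inside one loop with a nested while) by three separate passes: first compute the exclusive right boundary of every left's window into a list, then build a prefix-sum array, then take the max of prefix[bound]-prefix[left] over all lefts.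
import Mathlib
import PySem

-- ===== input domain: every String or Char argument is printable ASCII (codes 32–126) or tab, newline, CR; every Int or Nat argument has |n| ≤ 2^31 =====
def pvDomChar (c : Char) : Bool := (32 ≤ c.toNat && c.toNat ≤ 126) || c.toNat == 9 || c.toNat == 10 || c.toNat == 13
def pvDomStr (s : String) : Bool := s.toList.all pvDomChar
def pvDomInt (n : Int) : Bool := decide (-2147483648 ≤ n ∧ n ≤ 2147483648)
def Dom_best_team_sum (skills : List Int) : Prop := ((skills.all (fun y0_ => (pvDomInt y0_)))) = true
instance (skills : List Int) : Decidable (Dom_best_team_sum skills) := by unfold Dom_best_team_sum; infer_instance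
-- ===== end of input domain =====

-- B replaces A's fused two-pointer loop (running window sum + running max in one loop)
-- by three separate passes: window boundaries, prefix sums, then the max; same O(n) cost (objective: alternative).

-- ===== PORT A =====
-- inner 'while' of A; all subscripts A actually evaluates are in range (right ≥ left always,
-- and skills[left+1] is only reached with left+1 ≤ right < len), so getD is exact here.
def pvAWhile (skills : List Int) (left right : Nat) (nowsum : Int) : Nat × Int :=
  if h : right < skills.length ∧
       (left = right ∨ skills.getD left 0 + skills.getD (left + 1) 0 ≥ skills.getD right 0) then
    pvAWhile skills left (right + 1) (nowsum + skills.getD right 0)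
  else (right, nowsum)
termination_by skills.length - right
decreasing_by omega

-- one iteration of A's 'for left in range(len(skills))'; state = (ans, nowsum, right)
def pvAStep (skills : List Int) (s : Int × Int × Nat) (left : Nat) : Int × Int × Nat :=
  let p := pvAWhile skills left s.2.2 s.2.1
  (max s.1 p.2, p.2 - skills.getD left 0, p.1)

def best_team_sum (skills : List Int) : Int :=
  ((List.range skills.length).foldl (pvAStep skills) (0, 0, 0)).1

-- ===== PORT B =====
-- B's threshold-only 'while r < n and skills[r] <= t'
def pvBWhile (skills : List Int) (t : Int) (r : Nat) : Nat :=
  if h : r < skills.length ∧ skills.getD r 0 ≤ t then pvBWhile skills t (r + 1) else r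
termination_by skills.length - r
decreasing_by omega

-- pass 1 body: state = (bounds so far, r)
def pvBoundsStep (skills : List Int) (s : List Nat × Nat) (left : Nat) : List Nat × Nat :=
  let r0 := if s.2 ≤ left then left + 1 else s.2
  let r1 := if left + 1 < skills.length then
      pvBWhile skills (skills.getD left 0 + skills.getD (left + 1) 0) r0
    else r0
  (s.1 ++ [r1], r1)

def pvBounds (skills : List Int) : List Nat :=
  ((List.range skills.length).foldl (pvBoundsStep skills) ([], 0)).1

-- pass 2: prefix sums built by appending prefix[-1] + x; state = (prefix, its last element)
def pvPrefix (skills : List Int) : List Int :=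
  (skills.foldl (fun (s : List Int × Int) x => (s.1 ++ [s.2 + x], s.2 + x)) ([(0 : Int)], 0)).1

-- pass 3 body: state = (best, i)
def pvBestStep (pre : List Int) (s : Int × Nat) (b : Nat) : Int × Nat :=
  (max s.1 (pre.getD b 0 - pre.getD s.2 0), s.2 + 1)

def best_team_sum_alt (skills : List Int) : Int :=
  let bounds := pvBounds skills
  let pre := pvPrefix skills
  (bounds.foldl (pvBestStep pre) (0, 0)).1

-- ===== PRECONDITION & SPEC =====
def Spec_best_team_sum (skills : List Int) (out : Int) : Prop := out = best_team_sum_alt skills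
instance (skills : List Int) (out : Int) : Decidable (Spec_best_team_sum skills out) := by unfold Spec_best_team_sum; infer_instance

-- ===== CLAIM (what is proved, stated in full; the proofs are below) =====
def Claim_equal_best_team_sum : Prop := ∀ (skills : List Int), Dom_best_team_sum skills → Spec_best_team_sum skills (best_team_sum skills)

-- ===== LEMMAS AND PROOFS =====

-- sum of the first j elements
def pvT (s : List Int) (j : Nat) : Int := (s.take j).sum

-- the common boundary-advance of both programs, as a function of (left, previous r)
def pvR (s : List Int) (l r : Nat) : Nat :=
  let r0 := if r ≤ l then l + 1 else r
  if l + 1 < s.length then pvBWhile s (s.getD l 0 + s.getD (l + 1) 0) r0 else r0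

-- reference loop both ports are reduced to
def pvRef (s : List Int) : Nat → Nat → Nat → Int → Int
  | 0, _, _, ans => ans
  | m + 1, k, r, ans => pvRef s m (k + 1) (pvR s k r) (max ans (pvT s (pvR s k r) - pvT s k))

-- the boundary list produced by pass 1 of B
def pvRseq (s : List Int) : Nat → Nat → Nat → List Nat
  | 0, _, _ => []
  | m + 1, k, r => pvR s k r :: pvRseq s m (k + 1) (pvR s k r)

-- partial prefix sums starting from v
def pvPsums (v : Int) : List Int → List Int
  | [] => []
  | x :: xs => (v + x) :: pvPsums (v + x) xs

theorem pvT_succ (s : List Int) (j : Nat) (h : j < s.length) :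
    pvT s (j + 1) = pvT s j + s.getD j 0 := by
  unfold pvT
  rw [List.take_add_one, List.sum_append]
  simp [List.getElem?_eq_getElem h, List.getD_eq_getElem?_getD]

theorem pvBWhile_stop (s : List Int) (t : Int) (r : Nat)
    (h : ¬(r < s.length ∧ s.getD r 0 ≤ t)) : pvBWhile s t r = r := by
  rw [pvBWhile, dif_neg h]

theorem pvBWhile_step (s : List Int) (t : Int) (r : Nat)
    (h : r < s.length ∧ s.getD r 0 ≤ t) : pvBWhile s t r = pvBWhile s t (r + 1) := by
  rw [pvBWhile, dif_pos h]

theorem pvBWhile_ge (s : List Int) (t : Int) (r : Nat) : r ≤ pvBWhile s t r := by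
  fun_induction pvBWhile s t r with
  | case1 r h ih => omega
  | case2 r h => omega

theorem pvBWhile_le (s : List Int) (t : Int) (r : Nat) (hr : r ≤ s.length) :
    pvBWhile s t r ≤ s.length := by
  fun_induction pvBWhile s t r with
  | case1 r h ih => exact ih (by omega)
  | case2 r h => omega

theorem pvR_bounds (s : List Int) (l r : Nat) (hl : l < s.length) (hlr : l ≤ r) (hr : r ≤ s.length) :
    l + 1 ≤ pvR s l r ∧ pvR s l r ≤ s.length ∧ r ≤ pvR s l r := by
  by_cases hc : r ≤ l
  · have h1 := pvBWhile_ge s (s.getD l 0 + s.getD (l + 1) 0) (l + 1)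
    have h2 := pvBWhile_le s (s.getD l 0 + s.getD (l + 1) 0) (l + 1) (by omega)
    simp only [pvR, if_pos hc]
    split_ifs <;> omega
  · have h1 := pvBWhile_ge s (s.getD l 0 + s.getD (l + 1) 0) r
    have h2 := pvBWhile_le s (s.getD l 0 + s.getD (l + 1) 0) r hr
    simp only [pvR, if_neg hc]
    split_ifs <;> omega

theorem pvR_diag (s : List Int) (l : Nat) : pvR s l l = pvR s l (l + 1) := by
  simp [pvR]

theorem pvR_gt (s : List Int) (l r : Nat) (h : l < r) :
    pvR s l r = if l + 1 < s.length then pvBWhile s (s.getD l 0 + s.getD (l + 1) 0) r else r := by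
  simp only [pvR, if_neg (by omega : ¬ r ≤ l)]

theorem pvR_big (s : List Int) (l r : Nat) (hl : l < s.length) (hr : s.length ≤ r) :
    pvR s l r = r := by
  rw [pvR_gt s l r (by omega)]
  split_ifs with h
  · exact pvBWhile_stop s _ r (by omega)
  · rfl

theorem pvAWhile_fst_aux (s : List Int) (l : Nat) (hl : l < s.length) :
    ∀ fuel r ns, s.length - r ≤ fuel → l ≤ r → (pvAWhile s l r ns).1 = pvR s l r := by
  intro fuel
  induction fuel with
  | zero =>
    intro r ns hf hlr
    rw [pvAWhile, dif_neg (by omega : ¬(r < s.length ∧ (l = r ∨ s.getD l 0 + s.getD (l + 1) 0 ≥ s.getD r 0)))]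
    exact (pvR_big s l r hl (by omega)).symm
  | succ fuel ih =>
    intro r ns hf hlr
    by_cases hg : r < s.length ∧ (l = r ∨ s.getD l 0 + s.getD (l + 1) 0 ≥ s.getD r 0)
    · rw [pvAWhile, dif_pos hg, ih (r + 1) (ns + s.getD r 0) (by omega) (by omega)]
      by_cases he : l = r
      · subst he; exact (pvR_diag s l).symm
      · have hlt : l < r := by omega
        have ht : s.getD r 0 ≤ s.getD l 0 + s.getD (l + 1) 0 := by
          rcases hg.2 with h | h
          · omega
          · exact h
        rw [pvR_gt s l r hlt, pvR_gt s l (r + 1) (by omega),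
          if_pos (by omega : l + 1 < s.length), if_pos (by omega : l + 1 < s.length)]
        exact (pvBWhile_step s _ r ⟨hg.1, ht⟩).symm
    · rw [pvAWhile, dif_neg hg]
      by_cases hn : r < s.length
      · have hne : l ≠ r := fun he => hg ⟨hn, Or.inl he⟩
        have hnt : ¬ s.getD r 0 ≤ s.getD l 0 + s.getD (l + 1) 0 := fun ht => hg ⟨hn, Or.inr ht⟩
        rw [pvR_gt s l r (by omega), if_pos (by omega : l + 1 < s.length)]
        exact (pvBWhile_stop s _ r (by intro h; exact hnt h.2)).symm
      · exact (pvR_big s l r hl (by omega)).symm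

theorem pvAWhile_fst (s : List Int) (l r : Nat) (ns : Int) (hl : l < s.length) (hlr : l ≤ r) :
    (pvAWhile s l r ns).1 = pvR s l r :=
  pvAWhile_fst_aux s l hl (s.length - r) r ns (by omega) hlr

theorem pvAWhile_snd_aux (s : List Int) (l : Nat) :
    ∀ fuel r ns, s.length - r ≤ fuel →
      (pvAWhile s l r ns).2 = ns + pvT s (pvAWhile s l r ns).1 - pvT s r := by
  intro fuel
  induction fuel with
  | zero =>
    intro r ns hf
    rw [pvAWhile, dif_neg (by omega : ¬(r < s.length ∧ (l = r ∨ s.getD l 0 + s.getD (l + 1) 0 ≥ s.getD r 0)))]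
    ring
  | succ fuel ih =>
    intro r ns hf
    by_cases hg : r < s.length ∧ (l = r ∨ s.getD l 0 + s.getD (l + 1) 0 ≥ s.getD r 0)
    · rw [pvAWhile, dif_pos hg, ih (r + 1) (ns + s.getD r 0) (by omega), pvT_succ s r hg.1]
      ring
    · rw [pvAWhile, dif_neg hg]; ring

theorem pvAWhile_snd (s : List Int) (l r : Nat) (ns : Int) :
    (pvAWhile s l r ns).2 = ns + pvT s (pvAWhile s l r ns).1 - pvT s r :=
  pvAWhile_snd_aux s l (s.length - r) r ns (by omega)

theorem pvA_main (s : List Int) (m k r : Nat) (ans : Int)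
    (hm : k + m = s.length) (hlr : k ≤ r) (hr : r ≤ s.length) :
    ((List.range' k m).foldl (pvAStep s) (ans, pvT s r - pvT s k, r)).1 = pvRef s m k r ans := by
  induction m generalizing k r ans with
  | zero => simp [pvRef]
  | succ m ih =>
    have hk : k < s.length := by omega
    have hR := pvR_bounds s k r hk hlr hr
    have h1 : (pvAWhile s k r (pvT s r - pvT s k)).1 = pvR s k r :=
      pvAWhile_fst s k r _ hk hlr
    have h2 : (pvAWhile s k r (pvT s r - pvT s k)).2 = pvT s (pvR s k r) - pvT s k := by
      have h := pvAWhile_snd s k r (pvT s r - pvT s k)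
      rw [h1] at h; rw [h]; ring
    rw [List.range'_succ, List.foldl_cons]
    have hstep : pvAStep s (ans, pvT s r - pvT s k, r) k
        = (max ans (pvT s (pvR s k r) - pvT s k), pvT s (pvR s k r) - pvT s (k + 1), pvR s k r) := by
      simp only [pvAStep]
      rw [h1, h2, pvT_succ s k hk]
      simp only [Prod.mk.injEq, true_and, and_true]
      ring
    rw [hstep]
    simp only [pvRef]
    exact ih (k + 1) (pvR s k r) _ (by omega) hR.1 hR.2.1

theorem pvBoundsStep_eq (s : List Int) (acc : List Nat) (r k : Nat) :
    pvBoundsStep s (acc, r) k = (acc ++ [pvR s k r], pvR s k r) := rfl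

theorem pvBounds_fold (s : List Int) (m k r : Nat) (acc : List Nat) :
    ((List.range' k m).foldl (pvBoundsStep s) (acc, r)).1 = acc ++ pvRseq s m k r := by
  induction m generalizing k r acc with
  | zero => simp [pvRseq]
  | succ m ih =>
    rw [List.range'_succ, List.foldl_cons, pvBoundsStep_eq, ih]
    simp [pvRseq]

theorem pvPsums_fold (xs : List Int) (acc : List Int) (v : Int) :
    (xs.foldl (fun (s : List Int × Int) x => (s.1 ++ [s.2 + x], s.2 + x)) (acc, v)).1
      = acc ++ pvPsums v xs := by
  induction xs generalizing acc v with
  | nil => simp [pvPsums]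
  | cons x xs ih =>
    rw [List.foldl_cons, ih]
    simp [pvPsums]

theorem pvPsums_getD (xs : List Int) (v : Int) (j : Nat) (h : j < xs.length) :
    (pvPsums v xs).getD j 0 = v + pvT xs (j + 1) := by
  induction xs generalizing v j with
  | nil => simp at h
  | cons x xs ih =>
    cases j with
    | zero => simp [pvPsums, pvT]
    | succ j =>
      have hj : j < xs.length := by simpa using h
      simp only [pvPsums, List.getD_cons_succ]
      rw [ih (v + x) j hj]
      simp [pvT, List.take_succ_cons]
      ring

theorem pvPrefix_eq (s : List Int) : pvPrefix s = 0 :: pvPsums 0 s := by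
  unfold pvPrefix
  rw [show ([(0 : Int)], (0 : Int)) = (([] : List Int) ++ [(0 : Int)], (0 : Int)) by simp] at *
  have h := pvPsums_fold s [(0 : Int)] 0
  simpa using h

theorem pvPrefix_getD (s : List Int) (j : Nat) (h : j ≤ s.length) :
    (pvPrefix s).getD j 0 = pvT s j := by
  rw [pvPrefix_eq]
  cases j with
  | zero => simp [pvT]
  | succ j =>
    have hj : j < s.length := by omega
    simp only [List.getD_cons_succ]
    rw [pvPsums_getD s 0 j hj]
    ring

theorem pvB_main (s : List Int) (m k r : Nat) (best : Int)
    (hm : k + m = s.length) (hlr : k ≤ r) (hr : r ≤ s.length) :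
    ((pvRseq s m k r).foldl (pvBestStep (pvPrefix s)) (best, k)).1 = pvRef s m k r best := by
  induction m generalizing k r best with
  | zero => simp [pvRseq, pvRef]
  | succ m ih =>
    have hk : k < s.length := by omega
    have hR := pvR_bounds s k r hk hlr hr
    simp only [pvRseq, List.foldl_cons, pvRef]
    have hstep : pvBestStep (pvPrefix s) (best, k) (pvR s k r)
        = (max best (pvT s (pvR s k r) - pvT s k), k + 1) := by
      simp only [pvBestStep]
      rw [pvPrefix_getD s (pvR s k r) hR.2.1, pvPrefix_getD s k (by omega)]
    rw [hstep]
    exact ih (k + 1) (pvR s k r) _ (by omega) hR.1 hR.2.1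

-- ===== VERDICT (by name: the statement is the Claim_ definition above) =====
theorem best_team_sum_spec : Claim_equal_best_team_sum := by
  intro skills _
  unfold Spec_best_team_sum best_team_sum best_team_sum_alt pvBounds
  have hA := pvA_main skills skills.length 0 0 0 (by omega) (by omega) (by omega)
  have hB := pvB_main skills skills.length 0 0 0 (by omega) (by omega) (by omega)
  have hb := pvBounds_fold skills skills.length 0 0 []
  simp only [List.range_eq_range']
  rw [show pvT skills 0 - pvT skills 0 = 0 by ring] at hA
  rw [hA, hb]
  simpa using hB.symm
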